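-- pv_equiv track=rewrite | github.com/essepuntato/comp-think | 2017-2018/exams/python/written-examination-2018-02-26_sect_2_w_count.py | w_count
-- ===== SOURCE A (Python) =====
-- def w_count(s, text):
--     result = {}
--
--     c_values = {}
--     for c in s.lower().replace(" ", ""):
--         if c not in c_values:
--             result[c] = 0
--             c_values[c] = 0
--         c_values[c] = (c_values[c] + 1) * 2
--
--     for k in c_values:
--         result[k] = calculate(k, c_values[k], text.split())
--
--     return result
--
-- def calculate(key, value, token_list):
--     l_len = len(token_list)
--     if l_len == 0:
--         return 0
--     else:
--         cur_token = token_list[0]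
--
--         if key in cur_token:
--             result = value
--         else:
--             result = -1
--
--         return result + calculate(key, value, token_list[1:l_len])
-- ===== SOURCE B (Python) =====
-- def w_count(s, text):
--     tokens = text.split()
--     t = len(tokens)
--     counts = {}
--     for c in s.lower().replace(" ", ""):
--         counts[c] = counts.get(c, 0) + 1
--     out = {}
--     for c, n in counts.items():
--         m = sum(1 for tok in tokens if c in tok)
--         out[c] = (2 ** (n + 1) - 2) * m - (t - m)
--     return out
-- ===== Notes on version B (the rewrite author's own statement) =====
-- stated objective: faster
-- what changed: B replaces the per-character recursive token-list walk with list slicing (and the repeated (v+1)*2 doubling loop) by one counter pass, the closed-form weight 2**(n+1)-2, and a single linear sum of token membership tests per character.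
import Mathlib
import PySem

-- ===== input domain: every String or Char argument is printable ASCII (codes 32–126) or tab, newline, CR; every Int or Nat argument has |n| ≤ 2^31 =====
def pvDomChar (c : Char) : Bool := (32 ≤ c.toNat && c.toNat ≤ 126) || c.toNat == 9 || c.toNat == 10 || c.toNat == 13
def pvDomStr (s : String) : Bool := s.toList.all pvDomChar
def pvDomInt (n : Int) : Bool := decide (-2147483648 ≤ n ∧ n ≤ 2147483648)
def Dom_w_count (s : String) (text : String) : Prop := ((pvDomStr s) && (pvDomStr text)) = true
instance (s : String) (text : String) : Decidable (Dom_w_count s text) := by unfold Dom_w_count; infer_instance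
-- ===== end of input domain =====

-- B replaces A's per-character recursive token-list walk and (v+1)*2 doubling loop by one
-- counter pass, the closed-form weight 2^(n+1)-2 and a single membership sum per character.


-- ===== PORT A =====
-- calculate(key, value, token_list); token_list[1:l_len] is exactly the tail of the nonempty list
def pvCalculate (key : String) (value : Int) (tokenList : List String) : Int :=
  match tokenList with
  | [] => 0
  | curToken :: rest =>
      (if PySem.Str.isIn key curToken then value else -1) + pvCalculate key value rest

-- body of A's first loop; iterating a Python string yields 1-char strings, modelled below by
-- folding over toList.map (String.mk [·]); c_values[c] is present at the read, so getD _ 0 is exact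
def pvStepA (st : PySem.Dict String Int × PySem.Dict String Int) (c : String) :
    PySem.Dict String Int × PySem.Dict String Int :=
  let st' := if st.2.contains c then st else (st.1.insert c 0, st.2.insert c 0)
  (st'.1, st'.2.insert c ((st'.2.getD c 0 + 1) * 2))

def w_count (s : String) (text : String) : List (String × Int) :=
  let st := ((PySem.Str.replace (PySem.Str.lower s) " " "").toList.map
      (fun c => String.mk [c])).foldl pvStepA (PySem.Dict.empty, PySem.Dict.empty)
  let result := st.2.keys.foldl
      (fun r k => r.insert k (pvCalculate k (st.2.getD k 0) (PySem.Str.split₀ text))) st.1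
  result.items

-- ===== PORT B =====
def w_count_alt (s : String) (text : String) : List (String × Int) :=
  let tokens := PySem.Str.split₀ text
  let t : Int := tokens.length
  let counts := ((PySem.Str.replace (PySem.Str.lower s) " " "").toList.map
      (fun c => String.mk [c])).foldl
      (fun d c => d.insert c (d.getD c 0 + 1)) (PySem.Dict.empty : PySem.Dict String Int)
  let out := counts.items.foldl
      (fun d p =>
        let m : Int := (tokens.countP (fun tok => PySem.Str.isIn p.1 tok) : Int)
        d.insert p.1 ((2 ^ (p.2 + 1).toNat - 2) * m - (t - m)))
      (PySem.Dict.empty : PySem.Dict String Int)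
  out.items

-- ===== PRECONDITION & SPEC =====
def Spec_w_count (s : String) (text : String) (out : List (String × Int)) : Prop := out = w_count_alt s text
instance (s : String) (text : String) (out : List (String × Int)) : Decidable (Spec_w_count s text out) := by unfold Spec_w_count; infer_instance

-- ===== CLAIM (what is proved, stated in full; the proofs are below) =====
def Claim_equal_w_count : Prop := ∀ (s : String) (text : String), Dom_w_count s text → Spec_w_count s text (w_count s text)

-- ===== LEMMAS AND PROOFS =====

def pvDouble (v : Int) : Int := (v + 1) * 2

lemma pvDouble_iterate (n : Nat) : pvDouble^[n] (0 : Int) = 2 ^ (n + 1) - 2 := by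
  induction n with
  | zero => simp
  | succ n ih =>
      rw [Function.iterate_succ_apply', ih, pvDouble, pow_succ]
      ring

lemma pvCalculate_eq (key : String) (v : Int) (ts : List String) :
    pvCalculate key v ts =
      v * (ts.countP (fun tok => PySem.Str.isIn key tok) : Int)
        - ((ts.length : Int) - (ts.countP (fun tok => PySem.Str.isIn key tok) : Int)) := by
  induction ts with
  | nil => simp [pvCalculate]
  | cons h t ih =>
      rw [pvCalculate, ih, List.countP_cons, List.length_cons]
      by_cases hin : PySem.Str.isIn key h
      · simp only [hin, if_pos]; push_cast; ring
      · simp only [hin, Bool.false_eq_true, if_false]; push_cast; ring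

-- characterisation of A's first loop (keys in first-seen order; values iterate the doubling)
lemma pvLoopA (cs : List String) (r cv : PySem.Dict String Int)
    (hk : r.keys = cv.keys) (hnd : cv.keys.Nodup) :
    (cs.foldl pvStepA (r, cv)).1.keys = (cs.foldl pvStepA (r, cv)).2.keys
    ∧ (cs.foldl pvStepA (r, cv)).2.keys = PySem.Set.update cv.keys cs
    ∧ (cs.foldl pvStepA (r, cv)).2.keys.Nodup
    ∧ ∀ k, (cs.foldl pvStepA (r, cv)).2.getD k 0
        = pvDouble^[cs.count k] (cv.getD k 0) := by
  induction cs generalizing r cv with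
  | nil => exact ⟨hk, rfl, hnd, fun k => rfl⟩
  | cons c cs ih =>
      obtain ⟨r₁, cv₁, hstep, h1, h2, h3, h4⟩ :
          ∃ (r₁ cv₁ : PySem.Dict String Int), pvStepA (r, cv) c = (r₁, cv₁.insert c ((cv₁.getD c 0 + 1) * 2))
            ∧ r₁.keys = cv₁.keys ∧ cv₁.keys.Nodup
            ∧ (∀ k, cv₁.getD k 0 = cv.getD k 0)
            ∧ cv₁.keys = PySem.Set.add cv.keys c := by
        by_cases hc : cv.contains c
        · refine ⟨r, cv, by simp [pvStepA, hc], hk, hnd, fun k => rfl, ?_⟩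
          have hmem : c ∈ cv.keys := (PySem.Dict.contains_iff_mem_keys cv c).mp hc
          simp [PySem.Set.add, PySem.Set.contains, hmem]
        · have hc' : cv.contains c = false := by simpa using hc
          have hrc : r.contains c = false := by
            rw [Bool.eq_false_iff]
            intro hr
            exact hc ((PySem.Dict.contains_iff_mem_keys cv c).mpr
              (hk ▸ (PySem.Dict.contains_iff_mem_keys r c).mp hr))
          refine ⟨r.insert c 0, cv.insert c 0, by simp [pvStepA, hc'], ?_, ?_, ?_, ?_⟩
          · rw [PySem.Dict.keys_insert_of_not_contains _ _ hrc,
                PySem.Dict.keys_insert_of_not_contains _ _ hc', hk]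
          · exact PySem.Dict.nodup_keys_insert _ _ _ hnd
          · intro k
            by_cases hkc : k = c
            · subst hkc
              rw [PySem.Dict.getD_insert_self, PySem.Dict.getD_of_not_contains _ _ hc']
            · rw [PySem.Dict.getD_insert_of_ne _ _ _ hkc]
          · have hmem : c ∉ cv.keys := fun h =>
              hc ((PySem.Dict.contains_iff_mem_keys cv c).mpr h)
            rw [PySem.Dict.keys_insert_of_not_contains _ _ hc']
            simp [PySem.Set.add, PySem.Set.contains, hmem]
      have hcont : cv₁.contains c = true := by
        rw [PySem.Dict.contains_iff_mem_keys, h4]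
        simp [PySem.Set.mem_add]
      have hkeys2 : (cv₁.insert c ((cv₁.getD c 0 + 1) * 2)).keys = cv₁.keys :=
        PySem.Dict.keys_insert_of_contains _ _ hcont
      rw [List.foldl_cons, hstep]
      obtain ⟨a1, a2, a3, a4⟩ := ih r₁ (cv₁.insert c ((cv₁.getD c 0 + 1) * 2))
        (h1.trans hkeys2.symm) (hkeys2 ▸ h2)
      refine ⟨a1, ?_, a3, ?_⟩
      · rw [a2, hkeys2, h4]
        rfl
      · intro k
        rw [a4 k, List.count_cons]
        by_cases hkc : k = c
        · subst hkc
          rw [PySem.Dict.getD_insert_self, h3]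
          simp only [beq_self_eq_true, if_true]
          rw [show (cv.getD k 0 + 1) * 2 = pvDouble (cv.getD k 0) from rfl,
            ← Function.iterate_succ_apply]
        · rw [PySem.Dict.getD_insert_of_ne _ _ _ hkc, h3]
          simp [Ne.symm hkc]

-- getD after A's second loop (insert val k over the distinct keys)
lemma pvLoop2_getD (l : List String) (hnd : l.Nodup) (val : String → Int)
    (d : PySem.Dict String Int) (k : String) :
    (l.foldl (fun d k => d.insert k (val k)) d).getD k 0
      = if k ∈ l then val k else d.getD k 0 := by
  induction l generalizing d with
  | nil => simp
  | cons a l ih =>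
      rw [List.foldl_cons, ih (List.Nodup.of_cons hnd)]
      by_cases hl : k ∈ l
      · simp [hl, List.mem_cons_of_mem a hl]
      · by_cases hka : k = a
        · subst hka
          simp [hl, PySem.Dict.getD_insert_self]
        · simp [hl, hka, PySem.Dict.getD_insert_of_ne _ _ _ hka]

lemma pvSet_update_self (s : PySem.Set String) (l : List String) (h : ∀ x ∈ l, x ∈ s) :
    PySem.Set.update s l = s := by
  induction l with
  | nil => rfl
  | cons a l ih =>
      have ha : PySem.Set.add s a = s := by
        simp [PySem.Set.add, PySem.Set.contains, h a List.mem_cons_self]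
      show PySem.Set.update (PySem.Set.add s a) l = s
      rw [ha]
      exact ih (fun x hx => h x (List.mem_cons_of_mem a hx))

lemma pvMain (cs tokens : List String) :
    (((cs.foldl pvStepA (PySem.Dict.empty, PySem.Dict.empty)).2.keys.foldl
        (fun r k => r.insert k (pvCalculate k
          ((cs.foldl pvStepA (PySem.Dict.empty, PySem.Dict.empty)).2.getD k 0) tokens))
        (cs.foldl pvStepA (PySem.Dict.empty, PySem.Dict.empty)).1).items)
    = ((cs.foldl (fun d c => d.insert c (d.getD c 0 + 1))
          (PySem.Dict.empty : PySem.Dict String Int)).items.foldl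
        (fun d p => d.insert p.1
          ((2 ^ (p.2 + 1).toNat - 2) * (tokens.countP (fun tok => PySem.Str.isIn p.1 tok) : Int)
            - ((tokens.length : Int) - (tokens.countP (fun tok => PySem.Str.isIn p.1 tok) : Int))))
        PySem.Dict.empty).items := by
  set st := cs.foldl pvStepA (PySem.Dict.empty, PySem.Dict.empty) with hst
  obtain ⟨a1, a2, a3, a4⟩ := pvLoopA cs PySem.Dict.empty PySem.Dict.empty
    (by rw [PySem.Dict.keys_empty]) (by rw [PySem.Dict.keys_empty]; exact List.nodup_nil)
  rw [← hst] at a1 a2 a3 a4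
  rw [PySem.Dict.keys_empty] at a2
  have hofL : st.2.keys = PySem.Set.ofList cs := a2
  -- A's second loop produces exactly the key list with the computed values
  have hreskeys : (st.2.keys.foldl
      (fun r k => r.insert k (pvCalculate k (st.2.getD k 0) tokens)) st.1).keys = st.2.keys := by
    rw [PySem.Dict.keys_foldl_insert st.2.keys
      (fun _ k => pvCalculate k (st.2.getD k 0) tokens) st.1, a1,
      pvSet_update_self _ _ (fun x hx => hx)]
  have hAitems : (st.2.keys.foldl
      (fun r k => r.insert k (pvCalculate k (st.2.getD k 0) tokens)) st.1).items
      = st.2.keys.map (fun k => (k, pvCalculate k (st.2.getD k 0) tokens)) := by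
    rw [PySem.Dict.items_eq_map_keys _ (by rw [hreskeys]; exact a3) 0, hreskeys]
    refine List.map_congr_left (fun k hk => ?_)
    rw [pvLoop2_getD st.2.keys a3 (fun k => pvCalculate k (st.2.getD k 0) tokens) st.1 k,
      if_pos hk]
  rw [hAitems]
  -- B's counter loop
  rw [PySem.Dict.foldl_insert_getD_add_one_eq_counter cs]
  -- B's output loop inserts fresh distinct keys
  have hfstnodup : ((PySem.Dict.counter cs).items.map Prod.fst).Nodup := by
    rw [PySem.Dict.items_counter, List.map_map]
    have hid : (Prod.fst ∘ fun k => (k, (cs.count k : Int))) = id := rfl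
    rw [hid, List.map_id]
    exact PySem.Set.nodup_ofList cs
  rw [PySem.Dict.items_foldl_insert_fresh (PySem.Dict.counter cs).items Prod.fst
    (fun p => (2 ^ (p.2 + 1).toNat - 2) * (tokens.countP (fun tok => PySem.Str.isIn p.1 tok) : Int)
      - ((tokens.length : Int) - (tokens.countP (fun tok => PySem.Str.isIn p.1 tok) : Int)))
    PySem.Dict.empty (fun a _ => PySem.Dict.contains_empty a.1) hfstnodup]
  rw [PySem.Dict.items_counter, List.map_map, hofL]
  have hemp : (PySem.Dict.empty : PySem.Dict String Int).items = [] := rfl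
  rw [hemp, List.nil_append]
  refine List.map_congr_left (fun k _ => ?_)
  simp only [Function.comp]
  rw [pvCalculate_eq, a4 k, PySem.Dict.getD_empty, pvDouble_iterate]
  have hcast : ((cs.count k : Int) + 1).toNat = cs.count k + 1 := by omega
  rw [hcast]

-- ===== VERDICT (by name: the statement is the Claim_ definition above) =====
theorem w_count_spec : Claim_equal_w_count := by
  intro s text _
  unfold Spec_w_count
  simp only [w_count, w_count_alt]
  exact pvMain _ _
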